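-- pv_equiv track=rewrite | github.com/Roboy/raveskills | modules/luigi/states/conversation_flow.py | get_complete_order_and_cost
-- ===== SOURCE A (Python) =====
-- cost_per_scoop = 1  # TODO move to external config file that also lists the available flavors and payment options
--
-- def get_complete_order_and_cost(flavor_scoop_tuple_list):
--     order = ""
--     cost = 0
--     if len(flavor_scoop_tuple_list) == 1:
--         order = "{scoops} scoops of {flavor}".format(flavor=flavor_scoop_tuple_list[0][0],
--                                                      scoops=flavor_scoop_tuple_list[0][1])
--         cost = cost_per_scoop * flavor_scoop_tuple_list[0][1]
--     else:
--         order_length = len(flavor_scoop_tuple_list)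
--         for i in range(0, order_length - 1):
--             order += "{scoops} scoops of {flavor}, ".format(flavor=flavor_scoop_tuple_list[i][0],
--                                                             scoops=flavor_scoop_tuple_list[i][1])
--             cost += cost_per_scoop * flavor_scoop_tuple_list[i][1]
--         order = order[:len(order) - 2] + " "
--         order += "and {scoops} scoops of {flavor}".format(flavor=flavor_scoop_tuple_list[order_length - 1][0],
--                                                           scoops=flavor_scoop_tuple_list[order_length - 1][1])
--         cost += cost_per_scoop * flavor_scoop_tuple_list[order_length - 1][1]
--     return order, cost
-- ===== SOURCE B (Python) =====
-- cost_per_scoop = 1  # TODO move to external config file that also lists the available flavors and payment options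
--
--
-- def get_complete_order_and_cost(flavor_scoop_tuple_list):
--     parts = ["{} scoops of {}".format(s, f) for f, s in flavor_scoop_tuple_list]
--     cost = cost_per_scoop * sum(s for _, s in flavor_scoop_tuple_list)
--     if len(parts) == 1:
--         return parts[0], cost
--     return ", ".join(parts[:-1]) + " and " + parts[-1], cost
-- ===== Notes on version B (the rewrite author's own statement) =====
-- stated objective: simpler
-- what changed: Replaces A's index loop that accumulates a string with a trailing ', ' it must later slice off (plus running cost additions) by a comprehension building the per-item parts, one sum for the cost, and a ', '.join of all but the last part glued with ' and ' to the last.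
-- outside the precondition, e.g. on get_complete_order_and_cost([]): A raises IndexError, B raises IndexError
import Mathlib
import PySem

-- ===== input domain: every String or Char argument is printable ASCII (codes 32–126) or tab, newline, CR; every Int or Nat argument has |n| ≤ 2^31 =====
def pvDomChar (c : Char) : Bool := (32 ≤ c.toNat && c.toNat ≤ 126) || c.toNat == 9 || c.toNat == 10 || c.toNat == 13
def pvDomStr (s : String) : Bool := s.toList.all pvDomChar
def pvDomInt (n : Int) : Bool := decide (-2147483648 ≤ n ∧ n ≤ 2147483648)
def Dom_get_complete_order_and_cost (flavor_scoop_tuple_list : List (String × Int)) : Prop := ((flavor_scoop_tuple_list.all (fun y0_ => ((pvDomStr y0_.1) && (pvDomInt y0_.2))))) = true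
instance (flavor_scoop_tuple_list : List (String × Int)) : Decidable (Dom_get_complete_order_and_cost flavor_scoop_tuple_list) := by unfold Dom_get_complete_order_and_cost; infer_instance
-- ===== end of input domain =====

-- B builds the parts with a comprehension, the cost with one sum, and joins with ", ".join + " and ";
-- A accumulates both in an index loop and slices a trailing ", " off afterwards. Equal results; not faster.

-- module-level constant used by both programs
def cost_per_scoop : Int := 1

-- "{scoops} scoops of {flavor}" (same format string in both Pythons)
def pvFmt (flavor : String) (scoops : Int) : List Char :=
  PySem.Int.toChars scoops ++ (" scoops of ").toList ++ flavor.toList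

-- ===== PORT A =====
def get_complete_order_and_cost (flavor_scoop_tuple_list : List (String × Int)) : String × Int :=
  let order : List Char := []
  let cost : Int := 0
  if flavor_scoop_tuple_list.length == 1 then
    let p := PySem.List.pyGetD flavor_scoop_tuple_list 0 ("", 0)
    let order := pvFmt p.1 p.2
    let cost := cost_per_scoop * p.2
    (String.ofList order, cost)
  else
    let order_length : Int := flavor_scoop_tuple_list.length
    let st := (PySem.List.pyRange 0 (order_length - 1) 1).foldl
      (fun (st : List Char × Int) i =>
        let p := PySem.List.pyGetD flavor_scoop_tuple_list i ("", 0)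
        (st.1 ++ (pvFmt p.1 p.2 ++ (", ").toList), st.2 + cost_per_scoop * p.2))
      (order, cost)
    let order := PySem.List.slice st.1 none (some ((st.1.length : Int) - 2)) ++ (" ").toList
    let q := PySem.List.pyGetD flavor_scoop_tuple_list (order_length - 1) ("", 0)
    let order := order ++ (("and ").toList ++ pvFmt q.1 q.2)
    (String.ofList order, st.2 + cost_per_scoop * q.2)

-- ===== PORT B =====
def get_complete_order_and_cost_alt (flavor_scoop_tuple_list : List (String × Int)) : String × Int :=
  let parts := flavor_scoop_tuple_list.map (fun p => pvFmt p.1 p.2)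
  let cost := cost_per_scoop * (flavor_scoop_tuple_list.map (fun p => p.2)).sum
  if parts.length == 1 then
    (String.ofList (PySem.List.pyGetD parts 0 []), cost)
  else
    (String.ofList (PySem.Chars.join ((", ").toList) (PySem.List.slice parts none (some (-1)))
        ++ (" and ").toList ++ PySem.List.pyGetD parts (-1) []), cost)

-- ===== PRECONDITION & SPEC =====
-- Pre_ excludes only the empty list, on which both Pythons raise IndexError.
def Pre_get_complete_order_and_cost (flavor_scoop_tuple_list : List (String × Int)) : Prop :=
  flavor_scoop_tuple_list ≠ []
instance (flavor_scoop_tuple_list : List (String × Int)) : Decidable (Pre_get_complete_order_and_cost flavor_scoop_tuple_list) := by unfold Pre_get_complete_order_and_cost; infer_instance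

def pvWitness_get_complete_order_and_cost : (List (String × Int)) := [("vanilla", 2)]

def Spec_get_complete_order_and_cost (flavor_scoop_tuple_list : List (String × Int)) (out : String × Int) : Prop := out = get_complete_order_and_cost_alt flavor_scoop_tuple_list
instance (flavor_scoop_tuple_list : List (String × Int)) (out : String × Int) : Decidable (Spec_get_complete_order_and_cost flavor_scoop_tuple_list out) := by unfold Spec_get_complete_order_and_cost; infer_instance

-- ===== CLAIM (what is proved, stated in full; the proofs are below) =====
def Claim_equal_get_complete_order_and_cost : Prop := ∀ (flavor_scoop_tuple_list : List (String × Int)), Dom_get_complete_order_and_cost flavor_scoop_tuple_list → Pre_get_complete_order_and_cost flavor_scoop_tuple_list → Spec_get_complete_order_and_cost flavor_scoop_tuple_list (get_complete_order_and_cost flavor_scoop_tuple_list)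

-- ===== LEMMAS AND PROOFS =====

-- joining the parts with ", " and appending one final ", " is the same as appending ", " to each part
theorem pvFlatMap_join {c : List Char} (F : (String × Int) → List Char) (ys : List (String × Int)) (h : ys ≠ []) :
    ys.flatMap (fun p => F p ++ c) = PySem.Chars.join c (ys.map F) ++ c := by
  induction ys with
  | nil => simp at h
  | cons a t ih =>
    cases t with
    | nil => simp [PySem.Chars.join_singleton]
    | cons b t' =>
      rw [List.flatMap_cons, ih (by simp)]
      simp [PySem.Chars.join_cons_cons]

theorem pvMain (ys : List (String × Int)) (q : String × Int) (h : ys ≠ []) :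
    get_complete_order_and_cost (ys ++ [q]) = get_complete_order_and_cost_alt (ys ++ [q]) := by
  have hlen : ((ys ++ [q]).length == 1) = false := by
    simp; rcases ys with _|_ <;> simp_all
  simp only [get_complete_order_and_cost, get_complete_order_and_cost_alt, List.length_map, hlen,
    Bool.false_eq_true, if_false]
  have hn : (((ys ++ [q]).length : Int) - 1) = (ys.length : Int) := by
    simp
  rw [hn]
  rw [PySem.List.foldl_congr_mem _ _ (fun (st : List Char × Int) i =>
        (st.1 ++ (pvFmt (PySem.List.pyGetD ys i ("", 0)).1 (PySem.List.pyGetD ys i ("", 0)).2 ++ (", ").toList),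
         st.2 + cost_per_scoop * (PySem.List.pyGetD ys i ("", 0)).2)) _
      (by
        intro acc x hx
        rw [PySem.List.mem_pyRange_one] at hx
        have e : PySem.List.pyGetD (ys ++ [q]) x ("", 0) = PySem.List.pyGetD ys x ("", 0) := by
          rw [PySem.List.pyGetD_eq_getElem _ _ hx.1 (by simp; omega),
              PySem.List.pyGetD_eq_getElem _ _ hx.1 (by exact_mod_cast hx.2)]
          exact List.getElem_append_left (by omega)
        simp only [e])]
  rw [PySem.List.foldl_pyRange_zero_pyGetD' ys ("", 0)
        (fun (st : List Char × Int) p =>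
          (st.1 ++ (pvFmt p.1 p.2 ++ (", ").toList), st.2 + cost_per_scoop * p.2)) ([], 0)]
  rw [PySem.List.foldl_prod_mk (fun (a : List Char) (p : String × Int) => a ++ (pvFmt p.1 p.2 ++ (", ").toList))
        (fun (b : Int) (p : String × Int) => b + cost_per_scoop * p.2) ys [] 0]
  rw [PySem.List.foldl_append_eq_flatMap (fun p => pvFmt p.1 p.2 ++ (", ").toList) ys []]
  rw [PySem.List.foldl_add]
  dsimp only
  simp only [List.nil_append]
  rw [pvFlatMap_join (fun p => pvFmt p.1 p.2) ys h]
  have hJ : ((PySem.Chars.join ((", ").toList) (ys.map fun p => pvFmt p.1 p.2) ++ (", ").toList).length : Int) - 2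
      = ((PySem.Chars.join ((", ").toList) (ys.map fun p => pvFmt p.1 p.2)).length : Int) := by
    push_cast [List.length_append]; simp
  rw [hJ, PySem.List.slice_to_natCast, List.take_left]
  simp only [List.map_append, List.map_cons, List.map_nil, PySem.List.slice_to_neg_one,
    List.dropLast_concat, PySem.List.pyGetD_neg_one_append_singleton, PySem.List.pyGetD_natCast]
  simp [cost_per_scoop, List.sum_append,
    show (" ".toList : List Char) = [' '] from rfl, show ("and ".toList : List Char) = ['a','n','d',' '] from rfl,
    show (" and ".toList : List Char) = [' ','a','n','d',' '] from rfl]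

-- ===== VERDICT (by name: the statement is the Claim_ definition above) =====
theorem get_complete_order_and_cost_spec : Claim_equal_get_complete_order_and_cost := by
  intro lst _ hne
  unfold Spec_get_complete_order_and_cost
  rcases List.eq_nil_or_concat lst with rfl | ⟨ys, q, rfl⟩
  · exact absurd rfl hne
  · rw [List.concat_eq_append]
    rcases ys with _ | ⟨p, t⟩
    · simp [get_complete_order_and_cost, get_complete_order_and_cost_alt,
        PySem.List.pyGetD_zero_cons]
    · exact pvMain (p :: t) q (by simp)
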